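-- pv_equiv track=rewrite | github.com/Edmond120/graph_scripts | full_bipartite_degree_sequences.py | compress_sequence
-- ===== SOURCE A (Python) =====
-- def compress_sequence(sequence):
-- 	counts = {}
-- 	for degree in sequence:
-- 		if degree in counts:
-- 			counts[degree] += 1
-- 		else:
-- 			counts[degree] = 1
-- 	s = ['(']
-- 	for num in sorted(counts, reverse=True):
-- 		s.append(str(num))
-- 		s.append('^')
-- 		s.append(str(counts[num]))
-- 		s.append(', ')
-- 	s.pop(-1)
-- 	s.append(')')
-- 	return ''.join(s)
-- ===== SOURCE B (Python) =====
-- def compress_sequence(sequence):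
-- 	t = sorted(sequence, reverse=True)
-- 	n = len(t)
-- 	s = ['(']
-- 	i = 0
-- 	while i < n:
-- 		j = i
-- 		while j < n and t[j] == t[i]:
-- 			j += 1
-- 		s.append(str(t[i]))
-- 		s.append('^')
-- 		s.append(str(j - i))
-- 		s.append(', ')
-- 		i = j
-- 	s.pop(-1)
-- 	s.append(')')
-- 	return ''.join(s)
-- ===== Notes on version B (the rewrite author's own statement) =====
-- stated objective: alternative
-- what changed: B sorts the whole sequence descending and emits each run's length in one group-scan over the sorted data, instead of building a hash count table and then iterating its sorted distinct keys with lookups.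
import Mathlib
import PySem

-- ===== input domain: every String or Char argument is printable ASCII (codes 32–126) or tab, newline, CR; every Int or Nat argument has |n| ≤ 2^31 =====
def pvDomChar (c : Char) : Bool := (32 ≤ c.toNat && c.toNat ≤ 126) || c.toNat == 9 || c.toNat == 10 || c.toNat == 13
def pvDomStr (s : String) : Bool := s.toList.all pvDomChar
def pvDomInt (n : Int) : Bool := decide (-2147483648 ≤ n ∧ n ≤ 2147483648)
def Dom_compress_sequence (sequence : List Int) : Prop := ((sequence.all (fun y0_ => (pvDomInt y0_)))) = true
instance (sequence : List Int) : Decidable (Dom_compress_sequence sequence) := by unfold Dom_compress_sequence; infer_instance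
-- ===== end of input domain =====

-- B replaces A's hash count table + sorted-distinct-keys scan by one run-length group-scan
-- over the fully sorted (descending) sequence; same output, an alternative algorithm of equal cost.

-- ===== PORT A =====
def compress_sequence (sequence : List Int) : String :=
  -- counts = {}; for degree in sequence: if degree in counts: counts[degree] += 1 else counts[degree] = 1
  let counts : PySem.Dict Int Int :=
    sequence.foldl
      (fun d degree =>
        if d.contains degree then d.insert degree (d.getD degree 0 + 1)
        else d.insert degree 1)
      PySem.Dict.empty
  -- s = ['(']; for num in sorted(counts, reverse=True): append num, '^', counts[num], ', '
  let s : List String :=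
    (PySem.List.sorted counts.keys (fun x => x) true).foldl
      (fun s num =>
        s ++ [PySem.Int.toStr num, "^", PySem.Int.toStr (counts.getD num 0), ", "])
      ["("]
  -- s.pop(-1); s.append(')'); return ''.join(s)   (s is never empty: it contains '(')
  let s := match PySem.List.pop? s (-1) with
    | some (_, rest) => rest
    | none => []     -- unreachable: s always holds '('
  PySem.Str.join "" (s ++ [")"])

-- ===== PORT B =====
-- inner while loop of Source B: while j < n and t[j] == t[i]: j += 1   (returns the final j)
def pvAltInner (t : List Int) (i : Nat) (j : Nat) : Nat :=
  if h : j < t.length ∧ t.getD j 0 = t.getD i 0 then pvAltInner t i (j + 1) else j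
termination_by t.length - j
decreasing_by omega

-- the inner scan never moves left
theorem pvAltInner_ge (t : List Int) (i j : Nat) : j ≤ pvAltInner t i j := by
  fun_induction pvAltInner t i j with
  | case1 j _h ih => omega
  | case2 j h => omega

-- outer while loop of Source B: while i < n: j = scan; append pieces; i = j
def pvAltOuter (t : List Int) (s : List String) (i : Nat) : List String :=
  if h : i < t.length then
    let j := pvAltInner t i i
    pvAltOuter t
      (s ++ [PySem.Int.toStr (t.getD i 0), "^", PySem.Int.toStr ((j - i : Nat) : Int), ", "]) j
  else s
termination_by t.length - i
decreasing_by
  have h1 : i + 1 ≤ pvAltInner t i (i + 1) := pvAltInner_ge t i (i + 1)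
  have h2 : pvAltInner t i i = pvAltInner t i (i + 1) := by
    rw [pvAltInner]; simp [h]
  omega

def compress_sequence_alt (sequence : List Int) : String :=
  let t := PySem.List.sorted sequence (fun x => x) true
  let s := pvAltOuter t ["("] 0
  let s := match PySem.List.pop? s (-1) with
    | some (_, rest) => rest
    | none => []     -- unreachable: s always holds '('
  PySem.Str.join "" (s ++ [")"])

-- ===== PRECONDITION & SPEC =====
def Spec_compress_sequence (sequence : List Int) (out : String) : Prop := out = compress_sequence_alt sequence
instance (sequence : List Int) (out : String) : Decidable (Spec_compress_sequence sequence out) := by unfold Spec_compress_sequence; infer_instance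

-- ===== CLAIM (what is proved, stated in full; the proofs are below) =====
def Claim_equal_compress_sequence : Prop := ∀ (sequence : List Int), Dom_compress_sequence sequence → Spec_compress_sequence sequence (compress_sequence sequence)

-- ===== LEMMAS AND PROOFS =====

-- A's counting loop is PySem.Dict.counter (when the key is absent its getD default is 0).
theorem pv_countsA_eq_counter (xs : List Int) :
    xs.foldl
      (fun (d : PySem.Dict Int Int) degree =>
        if d.contains degree then d.insert degree (d.getD degree 0 + 1)
        else d.insert degree 1)
      PySem.Dict.empty = PySem.Dict.counter xs := by
  rw [← PySem.Dict.foldl_insert_getD_add_one_eq_counter]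
  congr 1
  funext d degree
  by_cases h : d.contains degree
  · simp [h]
  · have h0 : d.getD degree 0 = 0 :=
      PySem.Dict.getD_of_not_contains d 0 (by simpa using h)
    simp [h, h0]

-- counting the elements of a flatMap of replicate-blocks over a nodup key list
theorem pv_count_flatMap_replicate (ds : List Int) (c : Int → Nat) (hnd : ds.Nodup) (v : Int) :
    List.count v (ds.flatMap fun k => List.replicate (c k) k) =
      if v ∈ ds then c v else 0 := by
  induction ds with
  | nil => simp
  | cons k ds ih =>
    simp only [List.flatMap_cons, List.count_append, List.count_replicate]
    have hnd' : ds.Nodup := hnd.of_cons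
    rw [ih hnd']
    by_cases hv : v = k
    · subst hv
      have : v ∉ ds := by
        intro hm; exact (List.nodup_cons.mp hnd).1 hm
      simp [this]
    · simp [hv, Ne.symm hv, beq_iff_eq]

-- the blocks of a strictly descending key list are sorted descending
theorem pv_pairwise_flatMap_replicate (ds : List Int) (c : Int → Nat)
    (hdesc : ds.Pairwise (fun a b => b < a)) :
    (ds.flatMap fun k => List.replicate (c k) k).Pairwise (fun a b => b ≤ a) := by
  induction ds with
  | nil => simp
  | cons k ds ih =>
    simp only [List.flatMap_cons, List.pairwise_append]
    refine ⟨?_, ih hdesc.of_cons, ?_⟩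
    · exact List.pairwise_replicate.mpr (Or.inr le_rfl)
    · intro a ha b hb
      have ha' : a = k := List.eq_of_mem_replicate ha
      obtain ⟨k', hk', hb'⟩ := List.mem_flatMap.mp hb
      have hb'' : b = k' := List.eq_of_mem_replicate hb'
      have : k' < k := (List.pairwise_cons.mp hdesc).1 k' hk'
      omega

-- canonical form: the descending sort of xs is the concatenation of replicate blocks
-- (count of each value) over the descending sort of the distinct values of xs
theorem pv_sorted_rev_eq_blocks (xs : List Int) :
    PySem.List.sorted xs (fun x => x) true =
      (PySem.List.sorted (PySem.Set.ofList xs) (fun x => x) true).flatMap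
        (fun k => List.replicate (xs.count k) k) := by
  set ks := PySem.List.sorted (PySem.Set.ofList xs) (fun x => x) true with hks
  have hksperm : ks.Perm (PySem.Set.ofList xs) := PySem.List.sorted_perm _ _ _
  have hksnd : ks.Nodup := hksperm.nodup_iff.mpr (PySem.Set.nodup_ofList xs)
  have hksge : ks.Pairwise (fun a b => b ≤ a) := PySem.List.sorted_pairwise_rev _ _
  have hksgt : ks.Pairwise (fun a b => b < a) := by
    have := hksge.and hksnd
    exact this.imp (by intro a b h; omega)
  have hmem : ∀ v : Int, v ∈ ks ↔ v ∈ xs := by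
    intro v
    rw [hks, PySem.List.mem_sorted, PySem.Set.mem_ofList]
  -- the block list is a permutation of xs
  have hperm : (ks.flatMap fun k => List.replicate (xs.count k) k).Perm xs := by
    rw [List.perm_iff_count]
    intro v
    rw [pv_count_flatMap_replicate ks _ hksnd v]
    by_cases hv : v ∈ ks
    · simp [hv]
    · have : v ∉ xs := fun h => hv ((hmem v).mpr h)
      simp [hv, List.count_eq_zero_of_not_mem this]
  have hsperm : (PySem.List.sorted xs (fun x => x) true).Perm
      (ks.flatMap fun k => List.replicate (xs.count k) k) :=
    (PySem.List.sorted_perm xs _ true).trans hperm.symm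
  refine List.Perm.eq_of_pairwise (le := fun a b => b ≤ a) ?_ ?_ ?_ hsperm
  · intro a b _ _ h1 h2; omega
  · exact PySem.List.sorted_pairwise_rev xs _
  · exact pv_pairwise_flatMap_replicate ks _ hksgt

-- the inner scan over a replicate-block: from position j with drop j t = replicate c v ++ rest,
-- v = t[i], and no element of rest equal to v, it stops exactly at j + c
theorem pv_inner_spec (t : List Int) (i : Nat) :
    ∀ (c : Nat) (j : Nat) (rest : List Int),
      t.drop j = List.replicate c (t.getD i 0) ++ rest →
      (∀ x ∈ rest, x ≠ t.getD i 0) →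
      pvAltInner t i j = j + c := by
  intro c
  induction c with
  | zero =>
    intro j rest hd hrest
    simp only [List.replicate_zero, List.nil_append] at hd
    have hneg : ¬ (j < t.length ∧ t.getD j 0 = t.getD i 0) := by
      intro ⟨hlt, heq⟩
      have hne : t.drop j ≠ [] := by
        intro h0
        have := List.drop_eq_nil_iff.mp h0
        omega
      have hmemr : t.getD j 0 ∈ rest := by
        have hg : (t.drop j).getD 0 0 = t.getD j 0 := by simp [List.getD, hlt]
        rw [← hg, hd]
        cases rest with
        | nil => exact absurd hd hne
        | cons a l => simp
      exact hrest _ hmemr heq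
    rw [pvAltInner, dif_neg hneg]
    omega
  | succ c ih =>
    intro j rest hd hrest
    have hne : t.drop j ≠ [] := by
      intro h0
      rw [h0] at hd
      simp [List.replicate_succ] at hd
    have hlt : j < t.length := by
      by_contra h
      exact hne (List.drop_eq_nil_iff.mpr (by omega))
    have hget : t.getD j 0 = t.getD i 0 := by
      have hg : (t.drop j).getD 0 0 = t.getD j 0 := by simp [List.getD, hlt]
      rw [← hg, hd]
      simp [List.replicate_succ]
    rw [pvAltInner, dif_pos ⟨hlt, hget⟩]
    have hstep : t.drop (j + 1) = List.replicate c (t.getD i 0) ++ rest := by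
      have hdd : t.drop (j + 1) = (t.drop j).tail := by
        rw [← List.drop_drop]; simp
      rw [hdd, hd]
      simp [List.replicate_succ]
    rw [ih (j + 1) rest hstep hrest]
    omega

-- the outer loop over a block-structured tail emits one piece-quadruple per block
theorem pv_outer_spec (t : List Int) (ds : List Int) (c : Int → Nat)
    (hdesc : ds.Pairwise (fun a b => b < a)) (hpos : ∀ k ∈ ds, 0 < c k) :
    ∀ (i : Nat) (s : List String),
      t.drop i = ds.flatMap (fun k => List.replicate (c k) k) →
      pvAltOuter t s i =
        s ++ ds.flatMap (fun k => [PySem.Int.toStr k, "^", PySem.Int.toStr ((c k : Nat) : Int), ", "]) := by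
  induction ds with
  | nil =>
    intro i s hd
    simp only [List.flatMap_nil] at hd ⊢
    rw [pvAltOuter, dif_neg, List.append_nil]
    have := List.drop_eq_nil_iff.mp hd
    omega
  | cons k ds ih =>
    intro i s hd
    simp only [List.flatMap_cons] at hd
    have hck : 0 < c k := hpos k (List.mem_cons_self)
    have hlt : i < t.length := by
      by_contra h
      have h0 : t.drop i = [] := List.drop_eq_nil_iff.mpr (by omega)
      rw [h0] at hd
      cases hc : c k with
      | zero => omega
      | succ m => rw [hc] at hd; simp [List.replicate_succ] at hd
    have hv : t.getD i 0 = k := by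
      have : (t.drop i).getD 0 0 = k := by
        rw [hd]
        cases hc : c k with
        | zero => omega
        | succ m => simp [List.replicate_succ]
      rw [← this]; simp [List.getD, hlt]
    have hrest : ∀ x ∈ ds.flatMap (fun k => List.replicate (c k) k), x ≠ t.getD i 0 := by
      intro x hx
      obtain ⟨k', hk', hx'⟩ := List.mem_flatMap.mp hx
      have hx'' : x = k' := List.eq_of_mem_replicate hx'
      have : k' < k := (List.pairwise_cons.mp hdesc).1 k' hk'
      rw [hv]; omega
    have hinner : pvAltInner t i i = i + c k := by
      exact pv_inner_spec t i (c k) i (ds.flatMap fun k => List.replicate (c k) k)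
        (by rw [hv]; exact hd) hrest
    rw [pvAltOuter, dif_pos hlt]
    simp only [hinner, hv]
    have hji : i + c k - i = c k := by omega
    rw [hji]
    have hdrop : t.drop (i + c k) = ds.flatMap (fun k => List.replicate (c k) k) := by
      have : t.drop (i + c k) = (t.drop i).drop (c k) := by rw [List.drop_drop]
      rw [this, hd, List.drop_append_of_le_length (by simp)]
      simp
    rw [ih hdesc.of_cons (fun k' hk' => hpos k' (List.mem_cons_of_mem _ hk')) (i + c k) _ hdrop]
    simp

-- ===== VERDICT (by name: the statement is the Claim_ definition above) =====
theorem compress_sequence_spec : Claim_equal_compress_sequence := by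
  intro xs _
  unfold Spec_compress_sequence
  simp only [compress_sequence, compress_sequence_alt]
  rw [pv_countsA_eq_counter xs, PySem.Dict.keys_counter]
  set ks := PySem.List.sorted (PySem.Set.ofList xs) (fun x => x) true with hks
  have hksperm : ks.Perm (PySem.Set.ofList xs) := PySem.List.sorted_perm _ _ _
  have hksnd : ks.Nodup := hksperm.nodup_iff.mpr (PySem.Set.nodup_ofList xs)
  have hksge : ks.Pairwise (fun a b => b ≤ a) := PySem.List.sorted_pairwise_rev _ _
  have hksgt : ks.Pairwise (fun a b => b < a) :=
    (hksge.and hksnd).imp (by intro a b h; omega)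
  -- A's piece list
  rw [PySem.List.foldl_append_eq_flatMap
    (fun num => [PySem.Int.toStr num, "^",
      PySem.Int.toStr ((PySem.Dict.counter xs).getD num 0), ", "]) ks ["("]]
  -- B's piece list
  rw [pv_outer_spec (PySem.List.sorted xs (fun x => x) true) ks (fun k => xs.count k)
        hksgt
        (fun k hk => by
          have : k ∈ xs := by
            have := (PySem.List.mem_sorted (PySem.Set.ofList xs) (fun x => x) true k).mp hk
            exact (PySem.Set.mem_ofList xs k).mp this
          exact List.count_pos_iff.mpr this)
        0 ["("]
        (by simpa using pv_sorted_rev_eq_blocks xs)]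
  -- identical pieces: counter lookup = count
  have hpieces :
      (ks.flatMap fun num => [PySem.Int.toStr num, "^",
        PySem.Int.toStr ((PySem.Dict.counter xs).getD num 0), ", "]) =
      (ks.flatMap fun k => [PySem.Int.toStr k, "^",
        PySem.Int.toStr ((xs.count k : Nat) : Int), ", "]) := by
    apply List.flatMap_congr
    intro k _
    rw [PySem.Dict.getD_counter]
  rw [hpieces]
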